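-- pv_equiv track=rewrite | github.com/BriannaBrown-hub/parking-lot | park.py | consecutive_car_spots
-- ===== SOURCE A (Python) =====
-- def consecutive_car_spots(spot_ids):
--     # first make sure the spots are sorted in ascending order
--     sorted_spots = sorted(set(spot_ids))
--     # instantiate a sub list of consecutive spots with the first spot
--     grouped = [[sorted_spots[0]]]
--
--     # utilize negative indexing to determine if the current value
--     # is consecutive to the last value added to the last sub list
--     # otherwise create a new sub list with the current value
--     for value in sorted_spots[1:]:
--         if value == grouped[-1][-1] + 1:
--             grouped[-1].append(value)
--         else:
--             grouped.append([value])
--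
--     three_consecutive_spots = list(filter(lambda spots: len(spots) >= 3, grouped))
--
--     return three_consecutive_spots[0][:3] if three_consecutive_spots != [] else []
-- ===== SOURCE B (Python) =====
-- def consecutive_car_spots(spot_ids):
--     # Single counting scan over the sorted distinct spots: track the current
--     # run length and return the first three of the first run that reaches 3.
--     sorted_spots = sorted(set(spot_ids))
--     prev = sorted_spots[0]
--     run = 1
--     for value in sorted_spots[1:]:
--         if value == prev + 1:
--             run += 1
--             if run == 3:
--                 return [value - 2, value - 1, value]
--         else:
--             run = 1
--         prev = value
--     return []
-- ===== Notes on version B (the rewrite author's own statement) =====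
-- stated objective: simpler
-- what changed: B replaces A's construction of all run sub-lists plus a post-hoc filter with a single counting scan that tracks only the previous value and current run length and returns the first three of the first run reaching length 3.
import Mathlib
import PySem

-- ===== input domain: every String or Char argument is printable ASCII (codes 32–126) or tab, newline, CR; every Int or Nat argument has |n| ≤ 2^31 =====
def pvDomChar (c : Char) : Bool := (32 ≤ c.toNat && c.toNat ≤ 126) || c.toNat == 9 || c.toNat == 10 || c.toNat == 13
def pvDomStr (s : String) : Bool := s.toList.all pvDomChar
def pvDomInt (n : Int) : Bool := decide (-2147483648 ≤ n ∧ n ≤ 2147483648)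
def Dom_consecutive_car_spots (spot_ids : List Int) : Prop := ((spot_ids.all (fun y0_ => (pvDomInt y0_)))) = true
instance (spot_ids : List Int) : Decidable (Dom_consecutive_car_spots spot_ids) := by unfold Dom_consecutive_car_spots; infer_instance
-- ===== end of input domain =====

-- B replaces A's "build all run sub-lists, then filter" with a single counting scan (objective: simpler).
-- Both Pythons raise IndexError on an empty spot_ids (sorted_spots[0]); Pre_ excludes exactly that input.

-- ===== PORT A =====
-- groups are kept reversed (head = most recently started group, its head = last appended value),
-- which is the standard transliteration of Python's append-at-the-end lists.
def stepA (g : List (List Int)) (v : Int) : List (List Int) :=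
  match g with
  | (x :: G) :: gs => if v = x + 1 then (v :: x :: G) :: gs else [v] :: (x :: G) :: gs
  | _ => [[v]]  -- unreachable: every group built is nonempty

-- the tail of A: filter the groups with len >= 3 and take the first three of the first one
def extractA (g : List (List Int)) : List Int :=
  match ((g.map List.reverse).reverse.filter (fun s => 3 ≤ s.length)) with
  | [] => []
  | G :: _ => G.take 3

def consecutive_car_spots (spot_ids : List Int) : List Int :=
  let sorted_spots := PySem.List.sorted (PySem.Set.ofList spot_ids) (fun x => x) false
  match sorted_spots with
  | [] => []                      -- Python raises IndexError here; excluded by Pre_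
  | h :: t => extractA (t.foldl stepA [[h]])

-- ===== PORT B =====
def goB (prev : Int) (run : Int) (rest : List Int) : List Int :=
  match rest with
  | [] => []
  | v :: vs =>
      if v = prev + 1 then
        if run + 1 = 3 then [v - 2, v - 1, v] else goB v (run + 1) vs
      else goB v 1 vs

def consecutive_car_spots_alt (spot_ids : List Int) : List Int :=
  let sorted_spots := PySem.List.sorted (PySem.Set.ofList spot_ids) (fun x => x) false
  match sorted_spots with
  | [] => []                      -- Python raises IndexError here; excluded by Pre_
  | h :: t => goB h 1 t

-- ===== PRECONDITION & SPEC =====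
-- Pre_ excludes only the empty list, on which both Pythons raise IndexError (sorted_spots[0]).
def Pre_consecutive_car_spots (spot_ids : List Int) : Prop := spot_ids ≠ []
instance (spot_ids : List Int) : Decidable (Pre_consecutive_car_spots spot_ids) := by
  unfold Pre_consecutive_car_spots; infer_instance
def pvWitness_consecutive_car_spots : List Int := [4, 2, 3]

def Spec_consecutive_car_spots (spot_ids : List Int) (out : List Int) : Prop := out = consecutive_car_spots_alt spot_ids
instance (spot_ids : List Int) (out : List Int) : Decidable (Spec_consecutive_car_spots spot_ids out) := by unfold Spec_consecutive_car_spots; infer_instance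

-- ===== CLAIM (what is proved, stated in full; the proofs are below) =====
def Claim_equal_consecutive_car_spots : Prop := ∀ (spot_ids : List Int), Dom_consecutive_car_spots spot_ids → Pre_consecutive_car_spots spot_ids → Spec_consecutive_car_spots spot_ids (consecutive_car_spots spot_ids)

-- ===== LEMMAS AND PROOFS =====

-- if every group is shorter than 3, the filter is empty and A extracts []
lemma extractA_all_small (g : List (List Int)) (h : ∀ H ∈ g, H.length < 3) :
    extractA g = [] := by
  have : (g.map List.reverse).reverse.filter (fun s => 3 ≤ s.length) = [] := by
    rw [List.filter_eq_nil_iff]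
    intro s hs
    simp only [List.mem_reverse, List.mem_map] at hs
    obtain ⟨H, hH, rfl⟩ := hs
    simpa using Nat.not_le.mpr (by simpa using h H hH)
  simp [extractA, this]

-- once a group of length ≥ 3 exists (with only short groups before it), the
-- rest of the fold cannot change the answer: it is that group's first three
lemma foldl_locked (vs : List Int) : ∀ (front : List (List Int)) (G0 : List Int)
    (gs : List (List Int)), (∀ F ∈ front, F ≠ []) → 3 ≤ G0.length →
    (∀ H ∈ gs, H.length < 3) →
    extractA (vs.foldl stepA (front ++ G0 :: gs)) = G0.reverse.take 3 := by
  induction vs with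
  | nil =>
    intro front G0 gs _ hG0 hgs
    have hnil : (gs.map List.reverse).reverse.filter (fun s => 3 ≤ s.length) = [] := by
      rw [List.filter_eq_nil_iff]
      intro s hs
      simp only [List.mem_reverse, List.mem_map] at hs
      obtain ⟨H, hH, rfl⟩ := hs
      simpa using Nat.not_le.mpr (by simpa using hgs H hH)
    have hsplit : ((front ++ G0 :: gs).map List.reverse).reverse
        = ((gs.map List.reverse).reverse ++ [G0.reverse]) ++ (front.map List.reverse).reverse := by
      simp
    rw [List.foldl_nil, extractA, hsplit, List.filter_append, List.filter_append, hnil,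
      List.nil_append, List.filter_cons_of_pos (by simpa using hG0)]
    rfl
  | cons v vs ih =>
    intro front G0 gs hfront hG0 hgs
    match front with
    | [] =>
      match G0, hG0 with
      | x :: G, hG0 =>
        simp only [List.nil_append, List.foldl_cons, stepA]
        by_cases hv : v = x + 1
        · subst hv
          rw [if_pos rfl]
          have := ih [] ((x + 1) :: x :: G) gs (by simp)
            (by simp only [List.length_cons] at hG0 ⊢; omega) hgs
          simp only [List.nil_append] at this
          rw [this, List.reverse_cons, List.take_append_of_le_length (by simpa using hG0)]
        · rw [if_neg hv]
          exact ih [[v]] (x :: G) gs (by simp) hG0 hgs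
    | (y :: F) :: fs =>
      simp only [List.cons_append, List.foldl_cons, stepA]
      by_cases hv : v = y + 1
      · subst hv
        rw [if_pos rfl]
        refine ih (((y + 1) :: y :: F) :: fs) G0 gs ?_ hG0 hgs
        intro H hH
        rcases List.mem_cons.mp hH with h | h
        · simp [h]
        · exact hfront H (List.mem_cons_of_mem _ h)
      · rw [if_neg hv]
        refine ih ([v] :: (y :: F) :: fs) G0 gs ?_ hG0 hgs
        intro H hH
        rcases List.mem_cons.mp hH with h | h
        · simp [h]
        · exact hfront H h
    | [] :: fs => exact absurd rfl (hfront [] (by simp))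

-- the main loop correspondence: A's fold state vs B's (prev, run) counters
lemma loop_eq (rest : List Int) : ∀ (x r : Int) (G : List Int) (gs : List (List Int)),
    ((r = 1 ∧ G = []) ∨ (r = 2 ∧ G = [x - 1])) →
    (∀ H ∈ gs, H.length < 3) →
    extractA (rest.foldl stepA ((x :: G) :: gs)) = goB x r rest := by
  induction rest with
  | nil =>
    intro x r G gs hG hgs
    rw [goB]
    apply extractA_all_small
    intro H hH
    rcases List.mem_cons.mp hH with h | h
    · rcases hG with ⟨_, rfl⟩ | ⟨_, rfl⟩ <;> simp [h]
    · exact hgs H h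
  | cons v vs ih =>
    intro x r G gs hG hgs
    simp only [List.foldl_cons, stepA, goB]
    by_cases hv : v = x + 1
    · subst hv
      rw [if_pos rfl, if_pos rfl]
      rcases hG with ⟨hr, rfl⟩ | ⟨hr, rfl⟩
      · subst hr
        rw [if_neg (by norm_num)]
        have := ih (x + 1) 2 [x] gs (Or.inr ⟨rfl, by norm_num⟩) hgs
        exact this
      · subst hr
        rw [if_pos (by norm_num)]
        have := foldl_locked vs [] [x + 1, x, x - 1] gs (by simp) (by simp) hgs
        simp only [List.nil_append] at this
        rw [this]
        norm_num [List.take]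
        omega
    · rw [if_neg hv, if_neg hv]
      refine ih v 1 [] ((x :: G) :: gs) (Or.inl ⟨rfl, rfl⟩) ?_
      intro H hH
      rcases List.mem_cons.mp hH with h | h
      · rcases hG with ⟨_, rfl⟩ | ⟨_, rfl⟩ <;> simp [h]
      · exact hgs H h

-- ===== VERDICT (by name: the statement is the Claim_ definition above) =====
theorem consecutive_car_spots_spec : Claim_equal_consecutive_car_spots := by
  intro spot_ids _ _
  unfold Spec_consecutive_car_spots consecutive_car_spots consecutive_car_spots_alt
  cases h : PySem.List.sorted (PySem.Set.ofList spot_ids) (fun x => x) false with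
  | nil => simp
  | cons hd t =>
    simp only
    exact loop_eq t hd 1 [] [] (Or.inl ⟨rfl, rfl⟩) (by simp)
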